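-- pv_equiv track=rewrite | github.com/daniel-sch/advent-of-code | python/solutions/utils/misc.py | split_lengths
-- ===== SOURCE A (Python) =====
-- def split_lengths(lst, separators, return_empty=True):
--     group_len = 0
--     for el in lst:
--         if el in separators:
--             if group_len > 0 or return_empty:
--                 yield group_len
--                 group_len = 0
--         else:
--             group_len += 1
--     if group_len > 0 or return_empty:
--         yield group_len
-- ===== SOURCE B (Python) =====
-- def split_lengths(lst, separators, return_empty=True):
--     sep_indices = [i for i, el in enumerate(lst) if el in separators]
--     bounds = [-1] + sep_indices + [len(lst)]
--     for a, b in zip(bounds, bounds[1:]):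
--         length = b - a - 1
--         if length > 0 or return_empty:
--             yield length
-- ===== Notes on version B (the rewrite author's own statement) =====
-- stated objective: alternative
-- what changed: B replaces A's running group-length counter with a single pass collecting separator indices, then yields segment lengths as differences of consecutive boundaries [-1]+indices+[n].
import Mathlib
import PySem

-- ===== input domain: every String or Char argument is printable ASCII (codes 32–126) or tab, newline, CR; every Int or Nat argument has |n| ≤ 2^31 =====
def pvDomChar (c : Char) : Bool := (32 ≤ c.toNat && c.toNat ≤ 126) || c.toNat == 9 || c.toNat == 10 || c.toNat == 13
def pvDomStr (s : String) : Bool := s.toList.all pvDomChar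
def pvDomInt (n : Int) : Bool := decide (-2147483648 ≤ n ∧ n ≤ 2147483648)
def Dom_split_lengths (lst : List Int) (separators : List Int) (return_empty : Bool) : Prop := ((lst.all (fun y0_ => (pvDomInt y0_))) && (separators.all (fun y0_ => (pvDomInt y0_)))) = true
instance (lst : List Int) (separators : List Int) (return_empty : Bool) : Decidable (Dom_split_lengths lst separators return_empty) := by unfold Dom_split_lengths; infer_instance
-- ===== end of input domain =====

-- B computes segment lengths as differences of consecutive boundaries ([-1] ++ separator indices ++ [n])
-- instead of A's running group-length counter: a different decomposition, same cost (objective: alternative).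

-- ===== PORT A =====
-- the generator's loop: running counter `g`, yields collected into the result list
def slGo (separators : List Int) (return_empty : Bool) : List Int → Int → List Int
  | [], g => if g > 0 || return_empty then [g] else []
  | el :: rest, g =>
    if el ∈ separators then
      if g > 0 || return_empty then g :: slGo separators return_empty rest 0
      else slGo separators return_empty rest g
    else slGo separators return_empty rest (g + 1)

def split_lengths (lst : List Int) (separators : List Int) (return_empty : Bool) : List Int :=
  slGo separators return_empty lst 0

-- ===== PORT B =====
-- [i for i, el in enumerate(lst) if el in separators], carrying the running index i
def slSepIdxs (separators : List Int) : List Int → Int → List Int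
  | [], _ => []
  | el :: rest, i =>
    if el ∈ separators then i :: slSepIdxs separators rest (i + 1)
    else slSepIdxs separators rest (i + 1)

-- the generator loop over zip(bounds, bounds[1:])
def slYield (return_empty : Bool) (bounds : List Int) : List Int :=
  (bounds.zip bounds.tail).foldr
    (fun p acc => if p.2 - p.1 - 1 > 0 || return_empty then (p.2 - p.1 - 1) :: acc else acc) []

def split_lengths_alt (lst : List Int) (separators : List Int) (return_empty : Bool) : List Int :=
  slYield return_empty (-1 :: (slSepIdxs separators lst 0 ++ [(lst.length : Int)]))

-- ===== PRECONDITION & SPEC =====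
def Spec_split_lengths (lst : List Int) (separators : List Int) (return_empty : Bool) (out : List Int) : Prop := out = split_lengths_alt lst separators return_empty
instance (lst : List Int) (separators : List Int) (return_empty : Bool) (out : List Int) : Decidable (Spec_split_lengths lst separators return_empty out) := by unfold Spec_split_lengths; infer_instance

-- ===== CLAIM (what is proved, stated in full; the proofs are below) =====
def Claim_equal_split_lengths : Prop := ∀ (lst : List Int) (separators : List Int) (return_empty : Bool), Dom_split_lengths lst separators return_empty → Spec_split_lengths lst separators return_empty (split_lengths lst separators return_empty)

-- ===== LEMMAS AND PROOFS =====

theorem slYield_cons (re : Bool) (a b : Int) (rest : List Int) :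
    slYield re (a :: b :: rest) =
      if b - a - 1 > 0 || re then (b - a - 1) :: slYield re (b :: rest) else slYield re (b :: rest) := by
  rfl

theorem slGo_eq (separators : List Int) (re : Bool) :
    ∀ (xs : List Int) (i g : Int), 0 ≤ g →
      slGo separators re xs g =
        slYield re ((i - 1 - g) :: (slSepIdxs separators xs i ++ [i + (xs.length : Int)])) := by
  intro xs
  induction xs with
  | nil =>
    intro i g _
    have h1 : i + (([] : List Int).length : Int) - (i - 1 - g) - 1 = g := by simp; ring
    simp only [slSepIdxs, List.nil_append, slYield_cons, h1]
    rcases h : (g > 0 || re) with _ | _ <;> simp [slGo, slYield, h]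
  | cons el rest ih =>
    intro i g hg
    have hlen : i + ((el :: rest).length : Int) = (i + 1) + (rest.length : Int) := by
      simp only [List.length_cons]; push_cast; ring
    by_cases hmem : el ∈ separators
    · simp only [slGo, slSepIdxs, if_pos hmem, List.cons_append, slYield_cons]
      have harith : i - (i - 1 - g) - 1 = g := by ring
      rw [harith]
      by_cases hc : g > 0 || re
      · simp only [if_pos hc]
        have := ih (i + 1) 0 le_rfl
        simp only [show (i + 1) - 1 - 0 = i by ring, hlen] at this ⊢
        rw [this]
      · simp only [if_neg hc]
        have hg0 : g = 0 := by
          rcases Bool.or_eq_false_iff.mp (Bool.eq_false_iff.mpr hc) with ⟨h1, _⟩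
          have := of_decide_eq_false h1
          omega
        subst hg0
        have := ih (i + 1) 0 le_rfl
        simp only [show (i + 1) - 1 - 0 = i by ring, hlen] at this ⊢
        rw [this]
    · simp only [slGo, slSepIdxs, if_neg hmem]
      have := ih (i + 1) (g + 1) (by omega)
      simp only [show (i + 1) - 1 - (g + 1) = i - 1 - g by ring, hlen] at this ⊢
      exact this

-- ===== VERDICT (by name: the statement is the Claim_ definition above) =====
theorem split_lengths_spec : Claim_equal_split_lengths := by
  intro lst separators re _
  unfold Spec_split_lengths split_lengths split_lengths_alt
  have := slGo_eq separators re lst 0 0 le_rfl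
  simpa using this
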